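-- pv_equiv track=rewrite | github.com/ShaonMajumder/Fitness-Project | rough_page/sleep_module.py | get_next_key
-- ===== SOURCE A (Python) =====
-- def get_next_key(d,target_key):
-- 	pos = -1
-- 	for key in d:
-- 	    pos=pos+1
-- 	    if key == target_key:
-- 	        listForm = list(d.keys())
-- 	        if (pos+1)< len(d):
-- 	        	return listForm[pos+1]
-- 	        else:
-- 	        	return False
-- ===== SOURCE B (Python) =====
-- def get_next_key(d, target_key):
--     keys = list(d)
--     nxt = dict(zip(keys, keys[1:]))
--     return nxt.get(target_key)
-- ===== Notes on version B (the rewrite author's own statement) =====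
-- stated objective: idiomatic
-- what changed: B builds a successor map (dict(zip(keys, keys[1:]))) once and answers by a single lookup, instead of A's counter-carrying scan that rebuilds list(d.keys()) and indexes into it; Pre_ excludes inputs where target_key is the last key, on which A returns the bool False, not an Optional[str].
-- outside the precondition, e.g. on get_next_key({'a': '1'}, 'a'): A returns False, B returns None
import Mathlib
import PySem

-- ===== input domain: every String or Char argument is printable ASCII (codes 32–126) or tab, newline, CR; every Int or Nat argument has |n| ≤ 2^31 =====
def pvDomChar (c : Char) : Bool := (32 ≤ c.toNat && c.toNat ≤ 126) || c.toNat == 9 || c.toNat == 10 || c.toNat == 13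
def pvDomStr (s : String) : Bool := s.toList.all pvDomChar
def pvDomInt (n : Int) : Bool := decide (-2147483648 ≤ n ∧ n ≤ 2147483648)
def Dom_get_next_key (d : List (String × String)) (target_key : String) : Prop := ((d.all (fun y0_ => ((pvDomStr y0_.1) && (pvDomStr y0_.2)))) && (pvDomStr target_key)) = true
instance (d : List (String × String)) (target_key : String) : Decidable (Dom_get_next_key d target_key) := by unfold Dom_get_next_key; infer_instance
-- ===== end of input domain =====

-- B replaces A's counter-carrying scan (which rebuilds list(d.keys()) and indexes it) by a
-- successor map dict(zip(keys, keys[1:])) looked up once — same cost, more idiomatic.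

-- ===== PORT A =====
-- A's for-loop over the dict's keys, carrying pos; listForm = list(d.keys()) and len(d) are
-- passed in as the full key list and its length.  On the `return False` branch (target is the
-- last key) the port returns none: that branch leaves the Optional[str] type and is excluded
-- by Pre_get_next_key.
def pvLoopA (keys : List String) (listForm : List String) (n : Int) (pos : Int)
    (target : String) : Option String :=
  match keys with
  | [] => none
  | key :: rest =>
      let pos := pos + 1
      if key == target then
        if pos + 1 < n then PySem.List.pyGet? listForm (pos + 1)
        else none
      else pvLoopA rest listForm n pos target

def get_next_key (d : List (String × String)) (target_key : String) : Option String :=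
  let keys := PySem.List.dedup (d.map Prod.fst)   -- the dict's keys, first-occurrence order
  pvLoopA keys keys (keys.length : Int) (-1) target_key

-- ===== PORT B =====
def get_next_key_alt (d : List (String × String)) (target_key : String) : Option String :=
  let keys := PySem.List.dedup (d.map Prod.fst)   -- keys = list(d)
  let nxt := PySem.Dict.ofList (keys.zip (PySem.List.slice keys (some 1) none))  -- dict(zip(keys, keys[1:]))
  nxt.get? target_key

-- ===== PRECONDITION & SPEC =====
-- Pre_ excludes exactly the inputs where target_key is the LAST key of the dict: there A
-- `return False`, a bool, not a value of the declared Optional[str] type (B returns None).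
def Pre_get_next_key (d : List (String × String)) (target_key : String) : Prop :=
  (PySem.List.dedup (d.map Prod.fst)).getLast? ≠ some target_key
instance (d : List (String × String)) (target_key : String) : Decidable (Pre_get_next_key d target_key) := by unfold Pre_get_next_key; infer_instance

def pvWitness_get_next_key : (List (String × String)) × String := ([("a", "1"), ("b", "2")], "a")

def Spec_get_next_key (d : List (String × String)) (target_key : String) (out : Option String) : Prop := out = get_next_key_alt d target_key
instance (d : List (String × String)) (target_key : String) (out : Option String) : Decidable (Spec_get_next_key d target_key out) := by unfold Spec_get_next_key; infer_instance

-- ===== CLAIM (what is proved, stated in full; the proofs are below) =====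
def Claim_equal_get_next_key : Prop := ∀ (d : List (String × String)) (target_key : String), Dom_get_next_key d target_key → Pre_get_next_key d target_key → Spec_get_next_key d target_key (get_next_key d target_key)

-- ===== LEMMAS AND PROOFS =====

-- Reference successor function: the key following the first occurrence of t in ks.
def pvSucc (ks : List String) (t : String) : Option String :=
  match ks with
  | [] => none
  | k :: rest => if k = t then rest.head? else pvSucc rest t

-- A's loop, started after j already-consumed keys, computes pvSucc of the remaining suffix.
theorem pvLoopA_eq_pvSucc (ks : List String) : ∀ (listForm : List String) (j : Nat) (t : String),
    listForm.drop j = ks →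
    pvLoopA ks listForm (listForm.length : Int) ((j : Int) - 1) t = pvSucc ks t := by
  induction ks with
  | nil => intro listForm j t _; rfl
  | cons k rest ih =>
      intro listForm j t hdrop
      have hlen : j + 1 + rest.length = listForm.length := by
        have := congrArg List.length hdrop
        simp [List.length_drop] at this
        omega
      have hdrop' : listForm.drop (j + 1) = rest := by
        have : listForm.drop (j + 1) = (listForm.drop j).drop 1 := by
          rw [List.drop_drop]
        rw [this, hdrop]
        rfl
      show (if (k == t) = true then
              if ((j : Int) - 1 + 1) + 1 < (listForm.length : Int) then
                PySem.List.pyGet? listForm (((j : Int) - 1 + 1) + 1)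
              else none
            else pvLoopA rest listForm (listForm.length : Int) ((j : Int) - 1 + 1) t)
          = pvSucc (k :: rest) t
      by_cases hk : k = t
      · simp only [hk, beq_self_eq_true, if_true, pvSucc]
        have harith : ((j : Int) - 1 + 1) + 1 = ((j + 1 : Nat) : Int) := by push_cast; ring
        rw [harith]
        by_cases hr : rest = []
        · subst hr
          have hnlt : ¬ (((j + 1 : Nat) : Int) < (listForm.length : Int)) := by
            simp only [List.length_nil] at hlen
            push_cast
            omega
          rw [if_neg hnlt]
          simp
        · have hlt : ((j + 1 : Nat) : Int) < (listForm.length : Int) := by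
            have : 0 < rest.length := List.length_pos_of_ne_nil hr
            push_cast; omega
          have hjlen : j + 1 < listForm.length := by
            have : 0 < rest.length := List.length_pos_of_ne_nil hr
            omega
          rw [if_pos hlt, PySem.List.pyGet?_natCast, ← List.head?_drop, hdrop']
      · have hbeq : (k == t) = false := by simp [hk]
        simp only [hbeq, Bool.false_eq_true, if_false, pvSucc, if_neg hk]
        have harith : (j : Int) - 1 + 1 = ((j + 1 : Nat) : Int) - 1 := by push_cast; ring
        rw [harith]
        exact ih listForm (j + 1) t hdrop'

-- Looking up a key absent from all pairs passes through the fold.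
theorem get?_foldl_insert_not_mem (ps : List (String × String)) :
    ∀ (d : PySem.Dict String String) (t : String), t ∉ ps.map Prod.fst →
    (ps.foldl (fun acc p => acc.insert p.1 p.2) d).get? t = d.get? t := by
  induction ps with
  | nil => intro d t _; rfl
  | cons p ps ih =>
      intro d t ht
      simp only [List.map_cons, List.mem_cons] at ht
      push Not at ht
      simp only [List.foldl_cons]
      rw [ih _ t ht.2, PySem.Dict.get?_insert_of_ne _ _ ht.1]

-- If two base dicts agree at t, the folds over the same pairs agree at t.
theorem get?_foldl_insert_congr (ps : List (String × String)) :
    ∀ (d d' : PySem.Dict String String) (t : String), d.get? t = d'.get? t →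
    (ps.foldl (fun acc p => acc.insert p.1 p.2) d).get? t
      = (ps.foldl (fun acc p => acc.insert p.1 p.2) d').get? t := by
  induction ps with
  | nil => intro d d' t h; exact h
  | cons p ps ih =>
      intro d d' t h
      simp only [List.foldl_cons]
      apply ih
      rw [PySem.Dict.get?_insert, PySem.Dict.get?_insert]
      split_ifs with he
      · rfl
      · exact h

-- B's successor map, on a duplicate-free key list whose last element is not t, computes pvSucc.
theorem dict_zip_eq_pvSucc (ks : List String) : ∀ (t : String), ks.Nodup →
    ks.getLast? ≠ some t →
    (PySem.Dict.ofList (ks.zip ks.tail)).get? t = pvSucc ks t := by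
  induction ks with
  | nil => intro t _ _; rfl
  | cons k rest ih =>
      intro t hnd hlast
      rcases hnd with _ | ⟨hk, hndr⟩
      match rest with
      | [] =>
          have : k ≠ t := fun h => hlast (by simp [h])
          simp [PySem.Dict.ofList, PySem.Dict.update, pvSucc, this, PySem.Dict.get?_empty]
      | r :: rs =>
          have hzip : (k :: r :: rs).zip (k :: r :: rs).tail
              = (k, r) :: ((r :: rs).zip (r :: rs).tail) := by simp [List.zip]
          have hlast' : (r :: rs).getLast? ≠ some t := by
            intro h; exact hlast (by rw [List.getLast?_cons_cons]; exact h)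
          simp only [PySem.Dict.ofList, PySem.Dict.update, hzip, List.foldl_cons]
          by_cases hkt : k = t
          · subst hkt
            have hnot : k ∉ ((r :: rs).zip (r :: rs).tail).map Prod.fst := by
              intro hmem
              have : k ∈ r :: rs := by
                rcases List.mem_map.mp hmem with ⟨p, hp, hp1⟩
                have := List.of_mem_zip hp
                exact hp1 ▸ this.1
              exact (hk k this) rfl
            rw [get?_foldl_insert_not_mem _ _ _ hnot, PySem.Dict.get?_insert_self]
            simp [pvSucc]
          · have hstep : ((PySem.Dict.empty : PySem.Dict String String).insert k r).get? t
                = (PySem.Dict.empty : PySem.Dict String String).get? t := by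
              exact PySem.Dict.get?_insert_of_ne _ _ (fun h => hkt h.symm)
            rw [get?_foldl_insert_congr _ _ _ _ hstep]
            have := ih t hndr hlast'
            simp only [PySem.Dict.ofList, PySem.Dict.update] at this
            rw [this]
            simp [pvSucc, hkt]

-- ===== VERDICT (by name: the statement is the Claim_ definition above) =====
theorem get_next_key_spec : Claim_equal_get_next_key := by
  intro d target_key _ hpre
  unfold Spec_get_next_key get_next_key get_next_key_alt
  simp only [PySem.List.slice_from_one]
  have hA := pvLoopA_eq_pvSucc (PySem.List.dedup (d.map Prod.fst))
      (PySem.List.dedup (d.map Prod.fst)) 0 target_key (by simp)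
  simp only [Nat.cast_zero, zero_sub] at hA
  rw [hA]
  have hB := dict_zip_eq_pvSucc (PySem.List.dedup (d.map Prod.fst)) target_key
      (PySem.List.nodup_dedup _) hpre
  rw [hB]
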